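-- pv_equiv track=rewrite | github.com/AbhigyanD/AnalystAI | Main Files/backend/services/dcf.py | get_last_fcf
-- ===== SOURCE A (Python) =====
-- def get_last_fcf(cash_flow):
--     """
--     Extracts the most recent Free Cash Flow (FCF) from the cash flow data.
--     If "Free Cash Flow" is not present, tries to compute it as:
--     FCF = Operating Cash Flow - Capital Expenditures.
--     """
--     fcf_data = cash_flow.get("Free Cash Flow", None)
--
--     if fcf_data is None:
--         operating_cf = cash_flow.get("Total Cash From Operating Activities", None)
--         capex = cash_flow.get("Capital Expenditures", None)
--         if operating_cf and capex:
--             fcf_data = {}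
--             for date in operating_cf:
--                 op_val = operating_cf.get(date, 0)
--                 capex_val = capex.get(date, 0)
--                 fcf_data[date] = op_val - capex_val
--         else:
--             return None
--
--     sorted_dates = sorted(fcf_data.keys())
--     latest_date = sorted_dates[-1]
--     return fcf_data[latest_date]
-- ===== SOURCE B (Python) =====
-- def get_last_fcf(cash_flow):
--     """Same result as A: latest-dated FCF, computed directly without building the per-date dict."""
--     fcf_data = cash_flow.get("Free Cash Flow")
--     if fcf_data is not None:
--         return fcf_data[max(fcf_data)]
--     op = cash_flow.get("Total Cash From Operating Activities")
--     capex = cash_flow.get("Capital Expenditures")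
--     if op and capex:
--         latest = max(op)
--         return op.get(latest, 0) - capex.get(latest, 0)
--     return None
-- ===== Notes on version B (the rewrite author's own statement) =====
-- stated objective: simpler
-- what changed: Instead of building the whole per-date FCF dict and then sorting all keys and indexing the last, B finds the latest date with a single max over the keys and computes only that one value.
import Mathlib
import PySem

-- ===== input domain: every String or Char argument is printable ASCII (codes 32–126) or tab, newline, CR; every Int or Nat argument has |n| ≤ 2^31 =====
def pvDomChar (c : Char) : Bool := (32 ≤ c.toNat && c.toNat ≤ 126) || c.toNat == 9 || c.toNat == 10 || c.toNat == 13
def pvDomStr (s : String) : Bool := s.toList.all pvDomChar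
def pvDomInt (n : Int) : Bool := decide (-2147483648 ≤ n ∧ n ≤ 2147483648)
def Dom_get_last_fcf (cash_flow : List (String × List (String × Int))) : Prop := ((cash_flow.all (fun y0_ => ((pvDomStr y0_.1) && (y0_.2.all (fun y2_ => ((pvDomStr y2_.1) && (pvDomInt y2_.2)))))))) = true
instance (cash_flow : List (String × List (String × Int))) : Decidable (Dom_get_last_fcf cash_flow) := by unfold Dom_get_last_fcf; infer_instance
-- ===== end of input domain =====

-- B replaces A's build-a-full-FCF-dict-then-sort-and-index pass by a direct max over the keys,
-- computing only the single returned value (objective: simpler).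

-- ===== PORT A =====
def get_last_fcf (cash_flow : List (String × List (String × Int))) : Option Int :=
  let cf := PySem.Dict.ofList cash_flow
  let fcf_data? : Option (PySem.Dict String Int) :=
    match cf.get? "Free Cash Flow" with
    | some l => some (PySem.Dict.ofList l)
    | none =>
      match cf.get? "Total Cash From Operating Activities", cf.get? "Capital Expenditures" with
      | some op, some capex =>
        let opd := PySem.Dict.ofList op
        let cd := PySem.Dict.ofList capex
        -- 'if operating_cf and capex:' — dict truthiness = nonempty
        if opd.size ≠ 0 ∧ cd.size ≠ 0 then
          some (opd.keys.foldl
            (fun d date => d.insert date (opd.getD date 0 - cd.getD date 0)) PySem.Dict.empty)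
        else none
      | _, _ => none
  match fcf_data? with
  | none => none
  | some f =>
    match PySem.List.pyGet? (PySem.List.sorted f.keys (fun x => x) false) (-1) with
    | none => none          -- sorted_dates[-1] raises IndexError here; excluded by Pre_
    | some latest => f.get? latest

-- ===== PORT B =====
def get_last_fcf_alt (cash_flow : List (String × List (String × Int))) : Option Int :=
  let cf := PySem.Dict.ofList cash_flow
  match cf.get? "Free Cash Flow" with
  | some l =>
    let d := PySem.Dict.ofList l
    match PySem.List.max? d.keys (fun x => x) with
    | some latest => d.get? latest
    | none => none          -- max() raises ValueError here; excluded by Pre_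
  | none =>
    match cf.get? "Total Cash From Operating Activities" with
    | none => none
    | some op =>
      match cf.get? "Capital Expenditures" with
      | none => none
      | some capex =>
        let opd := PySem.Dict.ofList op
        let cd := PySem.Dict.ofList capex
        if opd.size ≠ 0 ∧ cd.size ≠ 0 then
          match PySem.List.max? opd.keys (fun x => x) with
          | some latest => some (opd.getD latest 0 - cd.getD latest 0)
          | none => none
        else none

-- ===== PRECONDITION & SPEC =====
-- Pre_ excludes only the inputs where A raises IndexError: a "Free Cash Flow" entry whose dict is empty.
def Pre_get_last_fcf (cash_flow : List (String × List (String × Int))) : Prop :=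
  (PySem.Dict.ofList cash_flow).get? "Free Cash Flow" ≠ some ([] : List (String × Int))
instance (cash_flow : List (String × List (String × Int))) : Decidable (Pre_get_last_fcf cash_flow) := by
  unfold Pre_get_last_fcf; infer_instance
def pvWitness_get_last_fcf : (List (String × List (String × Int))) :=
  [("Free Cash Flow", [("2020", 5), ("2021", 7)])]

def Spec_get_last_fcf (cash_flow : List (String × List (String × Int))) (out : Option Int) : Prop := out = get_last_fcf_alt cash_flow
instance (cash_flow : List (String × List (String × Int))) (out : Option Int) : Decidable (Spec_get_last_fcf cash_flow out) := by unfold Spec_get_last_fcf; infer_instance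

-- ===== CLAIM (what is proved, stated in full; the proofs are below) =====
def Claim_equal_get_last_fcf : Prop := ∀ (cash_flow : List (String × List (String × Int))), Dom_get_last_fcf cash_flow → Pre_get_last_fcf cash_flow → Spec_get_last_fcf cash_flow (get_last_fcf cash_flow)

-- ===== LEMMAS AND PROOFS =====

theorem pv_le_getLast (l : List String) :
    l.Pairwise (· ≤ ·) → ∀ (h : l ≠ []), ∀ x ∈ l, x ≤ l.getLast h := by
  induction l with
  | nil => intro _ h; exact absurd rfl h
  | cons a t ih =>
    intro hp h x hx
    rcases List.pairwise_cons.1 hp with ⟨ha, ht⟩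
    cases t with
    | nil =>
      simp only [List.mem_cons, List.not_mem_nil, or_false] at hx
      simp [hx]
    | cons b u =>
      rw [List.getLast_cons (by simp)]
      rcases List.mem_cons.1 hx with hxa | hx'
      · subst hxa
        exact le_trans (ha b (by simp)) (ih ht (by simp) b (by simp))
      · exact ih ht (by simp) x hx' 

-- sorted(ks)[-1] = max(ks) for nonempty ks (String keys)
theorem pv_last_sorted_eq_max (ks : List String) (h : ks ≠ []) :
    PySem.List.pyGet? (PySem.List.sorted ks (fun x => x) false) (-1)
      = PySem.List.max? ks (fun x => x) := by
  have hs : PySem.List.sorted ks (fun x => x) false ≠ [] := by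
    intro hnil
    have := PySem.List.length_sorted ks (fun x => x) false
    rw [hnil] at this
    exact h (List.eq_nil_of_length_eq_zero this.symm)
  obtain ⟨m, hm⟩ : ∃ m, PySem.List.max? ks (fun x => x) = some m := by
    cases hmx : PySem.List.max? ks (fun x => x) with
    | none => exact absurd ((PySem.List.max?_eq_none_iff ks _).1 hmx) h
    | some m => exact ⟨m, rfl⟩
  rw [PySem.List.pyGet?_neg_one, @List.getLast?_eq_some_getLast _ _ hs, hm]
  have hperm := PySem.List.sorted_perm ks (fun x => x) false
  have hlast_mem : (PySem.List.sorted ks (fun x => x) false).getLast hs ∈ ks :=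
    hperm.mem_iff.1 (List.getLast_mem hs)
  have hm_mem : m ∈ PySem.List.sorted ks (fun x => x) false :=
    hperm.mem_iff.2 (PySem.List.max?_mem hm)
  have h1 : (PySem.List.sorted ks (fun x => x) false).getLast hs ≤ m :=
    PySem.List.max?_isMax hm _ hlast_mem
  have h2 : m ≤ (PySem.List.sorted ks (fun x => x) false).getLast hs :=
    pv_le_getLast _ (PySem.List.sorted_pairwise ks (fun x => x)) hs m hm_mem
  exact congrArg some (le_antisymm h1 h2)

theorem pv_keys_ofList (l : List (String × Int)) :
    (PySem.Dict.ofList l).keys = PySem.Set.ofList (l.map Prod.fst) := by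
  have : (PySem.Dict.ofList l).keys
      = PySem.Set.update (PySem.Dict.empty : PySem.Dict String Int).keys (l.map Prod.fst) :=
    PySem.Dict.keys_foldl_insert_key l Prod.fst (fun _ p => p.2) PySem.Dict.empty
  rw [this]
  simp [PySem.Dict.keys_empty, PySem.Set.update_nil_left]

theorem pv_keys_ofList_ne_nil (l : List (String × Int)) (h : l ≠ []) :
    (PySem.Dict.ofList l).keys ≠ [] := by
  cases l with
  | nil => exact absurd rfl h
  | cons p t =>
    rw [pv_keys_ofList]
    intro hnil
    have : p.1 ∈ PySem.Set.ofList ((p :: t).map Prod.fst) := by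
      rw [PySem.Set.mem_ofList]; simp
    rw [hnil] at this
    simp at this

-- the FCF dict A builds over op's keys: its items are exactly the computed pairs
theorem pv_build_items (opd cd : PySem.Dict String Int) (hnd : opd.keys.Nodup) :
    (opd.keys.foldl (fun d date => d.insert date (opd.getD date 0 - cd.getD date 0))
        PySem.Dict.empty).items
      = opd.keys.map (fun date => (date, opd.getD date 0 - cd.getD date 0)) := by
  have := PySem.Dict.items_foldl_insert_fresh opd.keys (fun a => a)
      (fun date => opd.getD date 0 - cd.getD date 0) PySem.Dict.empty
      (by intro a _; exact PySem.Dict.contains_empty a) (by simpa using hnd)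
  simpa [PySem.Dict.items] using this

theorem get_last_fcf_spec : Claim_equal_get_last_fcf := by
  intro cash_flow _ hpre
  unfold Spec_get_last_fcf get_last_fcf get_last_fcf_alt
  unfold Pre_get_last_fcf at hpre
  cases hfcf : (PySem.Dict.ofList cash_flow).get? "Free Cash Flow" with
  | some l =>
    simp only [hfcf]
    have hl : l ≠ [] := by intro h; exact hpre (by rw [hfcf, h])
    have hk := pv_keys_ofList_ne_nil l hl
    rw [pv_last_sorted_eq_max _ hk]
    cases PySem.List.max? (PySem.Dict.ofList l).keys (fun x => x) <;> rfl
  | none =>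
    simp only [hfcf]
    cases hop : (PySem.Dict.ofList cash_flow).get? "Total Cash From Operating Activities" with
    | none => simp
    | some op =>
      cases hcx : (PySem.Dict.ofList cash_flow).get? "Capital Expenditures" with
      | none => simp
      | some capex =>
        simp only
        set opd := PySem.Dict.ofList op with hopd
        set cd := PySem.Dict.ofList capex with hcd
        by_cases hsz : opd.size ≠ 0 ∧ cd.size ≠ 0
        · simp only [if_pos hsz]
          set f := opd.keys.foldl
            (fun d date => d.insert date (opd.getD date 0 - cd.getD date 0)) PySem.Dict.empty
            with hf
          have hnd : opd.keys.Nodup := PySem.Dict.nodup_keys_ofList op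
          have hitems := pv_build_items opd cd hnd
          have hkeys : f.keys = opd.keys := by
            rw [hf, PySem.Dict.keys, hitems]; simp [Function.comp_def]
          have hkne : opd.keys ≠ [] := by
            intro hnil
            have : opd.size = 0 := by
              have := congrArg List.length hnil
              simpa [PySem.Dict.keys, PySem.Dict.size] using this
            exact hsz.1 this
          rw [hkeys, pv_last_sorted_eq_max _ hkne]
          cases hmx : PySem.List.max? opd.keys (fun x => x) with
          | none => simp
          | some latest =>
            simp only
            have hmem : latest ∈ opd.keys := PySem.List.max?_mem hmx
            have hpair : (latest, opd.getD latest 0 - cd.getD latest 0) ∈ f.items := by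
              rw [hitems]; exact List.mem_map_of_mem hmem
            exact PySem.Dict.get?_of_mem_items f hpair (by rw [hkeys]; exact hnd)
        · simp only [if_neg hsz]
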